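-- pv_equiv track=rewrite | github.com/snowmanila/ManilaDokkanWebCalculator | calcSAAPI.py | retrieveLead
-- ===== SOURCE A (Python) =====
-- def retrieveLead(response, rank, EZA):
--     lead = response[response.find('. | ')+4:response.find('name="description"')-2]
--     if EZA == 1 or EZA == 2:
--         i = 0
--         while response.__contains__('leader_skill'):
--             response = response[response.find('leader_skill')+12:]
--             i += 1
--
--             if rank == 'UR' and i == 8:
--                 break
--             elif rank == 'LR' and i == 2:
--                 break
--         lead = response[response.find('description&quot;:&quot;')+24:response.find('&quot;,&quot;effects')]
--
--     lead = lead.replace("\&quot;", "'")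
--     lead = lead.replace("&#39;", "'")
--     lead = lead.replace("&amp;", "&")
--     lead = lead.replace("+ ", "+")
--
--     return lead
-- ===== SOURCE B (Python) =====
-- def retrieveLead(response, rank, EZA):
--     lead = response[response.find('. | ')+4:response.find('name="description"')-2]
--     if EZA == 1 or EZA == 2:
--         parts = response.split('leader_skill')
--         n = len(parts) - 1
--         if rank == 'UR':
--             k = min(8, n)
--         elif rank == 'LR':
--             k = min(2, n)
--         else:
--             k = n
--         response = 'leader_skill'.join(parts[k:])
--         lead = response[response.find('description&quot;:&quot;')+24:response.find('&quot;,&quot;effects')]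
--     for old, new in (('\\&quot;', "'"), ('&#39;', "'"), ('&amp;', '&'), ('+ ', '+')):
--         lead = lead.replace(old, new)
--     return lead
-- ===== Notes on version B (the rewrite author's own statement) =====
-- stated objective: simpler
-- what changed: Replaces A's while loop that repeatedly re-slices the string after each first occurrence of 'leader_skill' by a single split on 'leader_skill' followed by joining the tail of the parts (k = min(8, n) pieces stripped for rank UR, min(2, n) for LR, all n otherwise), plus a table-driven loop for the final replacements.
import Mathlib
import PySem

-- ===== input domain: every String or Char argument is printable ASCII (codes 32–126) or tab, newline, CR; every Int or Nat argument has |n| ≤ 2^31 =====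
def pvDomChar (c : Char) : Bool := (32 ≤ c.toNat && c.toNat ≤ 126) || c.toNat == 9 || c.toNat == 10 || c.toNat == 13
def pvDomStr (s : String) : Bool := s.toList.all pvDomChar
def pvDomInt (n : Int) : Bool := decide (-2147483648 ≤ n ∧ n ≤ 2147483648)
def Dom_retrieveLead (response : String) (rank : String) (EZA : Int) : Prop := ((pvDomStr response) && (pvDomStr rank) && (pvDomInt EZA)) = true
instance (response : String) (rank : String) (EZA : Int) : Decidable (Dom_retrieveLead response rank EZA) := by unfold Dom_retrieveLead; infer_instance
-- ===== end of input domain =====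

-- B replaces A's repeated cut-at-first-occurrence while loop by one split on 'leader_skill'
-- plus a join of the tail of the parts; everything else (slicing, replacements) is the same.

-- ===== PORT A =====
-- the while loop of A: repeatedly cut the string just after the first 'leader_skill',
-- counting iterations and breaking at 8 (UR) resp. 2 (LR)
def pvLoopA (response : String) (rank : String) (i : Int) : String :=
  if PySem.Str.isIn "leader_skill" response then
    let response' := PySem.Str.slice response (some (PySem.Str.find response "leader_skill" + 12)) none
    let i' := i + 1
    if rank = "UR" ∧ i' = 8 then response'
    else if rank = "LR" ∧ i' = 2 then response'
    else pvLoopA response' rank i'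
  else response
termination_by response.toList.length
decreasing_by
  rename_i h _ _
  simp only [PySem.Str.toList_slice, PySem.Chars.slice_eq_listSlice]
  have hf : -1 ≤ PySem.Str.find response "leader_skill" := by
    simp only [PySem.Str.find_eq]; exact PySem.Chars.neg_one_le_find _ _
  have hne : response.toList ≠ [] := by
    intro hnil
    rw [PySem.Str.isIn_eq, hnil] at h
    exact absurd h (by decide)
  rw [PySem.List.slice_from _
    (show (0:Int) ≤ PySem.Str.find response "leader_skill" + 12 by omega)]
  have : 1 ≤ (PySem.Str.find response "leader_skill" + 12).toNat := by omega
  have hlen : 0 < response.toList.length := List.length_pos_iff.mpr hne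
  simp only [List.length_drop]
  omega

def retrieveLead (response : String) (rank : String) (EZA : Int) : String :=
  let lead := PySem.Str.slice response (some (PySem.Str.find response ". | " + 4))
      (some (PySem.Str.find response "name=\"description\"" - 2))
  let lead :=
    if EZA = 1 ∨ EZA = 2 then
      let response := pvLoopA response rank 0
      PySem.Str.slice response (some (PySem.Str.find response "description&quot;:&quot;" + 24))
        (some (PySem.Str.find response "&quot;,&quot;effects"))
    else lead
  let lead := PySem.Str.replace lead "\\&quot;" "'"
  let lead := PySem.Str.replace lead "&#39;" "'"
  let lead := PySem.Str.replace lead "&amp;" "&"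
  let lead := PySem.Str.replace lead "+ " "+"
  lead

-- ===== PORT B =====
def retrieveLead_alt (response : String) (rank : String) (EZA : Int) : String :=
  let lead := PySem.Str.slice response (some (PySem.Str.find response ". | " + 4))
      (some (PySem.Str.find response "name=\"description\"" - 2))
  let lead :=
    if EZA = 1 ∨ EZA = 2 then
      let parts : List String := (PySem.Str.split? response "leader_skill").getD []
      let n : Int := (parts.length : Int) - 1
      let k : Int := if rank = "UR" then min 8 n else if rank = "LR" then min 2 n else n
      let response := PySem.Str.join "leader_skill" (PySem.List.slice parts (some k) none)
      PySem.Str.slice response (some (PySem.Str.find response "description&quot;:&quot;" + 24))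
        (some (PySem.Str.find response "&quot;,&quot;effects"))
    else lead
  (("\\&quot;", "'") :: ("&#39;", "'") :: ("&amp;", "&") :: ("+ ", "+") :: []).foldl
    (fun l p => PySem.Str.replace l p.1 p.2) lead

-- ===== PRECONDITION & SPEC =====
def Spec_retrieveLead (response : String) (rank : String) (EZA : Int) (out : String) : Prop := out = retrieveLead_alt response rank EZA
instance (response : String) (rank : String) (EZA : Int) (out : String) : Decidable (Spec_retrieveLead response rank EZA out) := by unfold Spec_retrieveLead; infer_instance

-- ===== CLAIM (what is proved, stated in full; the proofs are below) =====
def Claim_equal_retrieveLead : Prop := ∀ (response : String) (rank : String) (EZA : Int), Dom_retrieveLead response rank EZA → Spec_retrieveLead response rank EZA (retrieveLead response rank EZA)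

-- ===== LEMMAS AND PROOFS =====

-- the separator, as a list of code points
def pvSep : List Char := "leader_skill".toList

-- the natural recursive characterisation of str.split(sep): first piece, then split of the rest
def pvSplit (l : List Char) : List (List Char) :=
  if PySem.Chars.isIn pvSep l then
    l.take (PySem.Chars.find l pvSep).toNat ::
      pvSplit (l.drop ((PySem.Chars.find l pvSep).toNat + 12))
  else [l]
termination_by l.length
decreasing_by
  rename_i h
  have hne : l ≠ [] := by
    intro hnil; rw [hnil] at h; exact absurd h (by decide)
  have hlen : 0 < l.length := List.length_pos_iff.mpr hne
  simp only [List.length_drop]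
  omega

-- glue a pending prefix onto the first piece
def pvGlue (p : List Char) : List (List Char) → List (List Char)
  | [] => [p]
  | h :: t => (p ++ h) :: t

theorem pvSplit_ne_nil (l : List Char) : pvSplit l ≠ [] := by
  rw [pvSplit]; split_ifs <;> simp

-- find.go at offset k is offset-0 find shifted by k
theorem pvFindGo_shift (l : List Char) (k : Nat) :
    PySem.Chars.find.go pvSep l k =
      if PySem.Chars.find.go pvSep l 0 = -1 then -1 else k + PySem.Chars.find.go pvSep l 0 := by
  induction l generalizing k with
  | nil =>
    rw [PySem.Chars.find.go.eq_def]
    rw [show PySem.Chars.find.go pvSep [] 0 = -1 by rw [PySem.Chars.find.go.eq_def]; decide]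
    simp [show pvSep.isEmpty = false by decide]
  | cons c t ih =>
    rw [PySem.Chars.find.go.eq_def]
    conv_rhs => rw [PySem.Chars.find.go.eq_def]
    by_cases hp : pvSep.isPrefixOf (c :: t)
    · simp [hp]
    · simp only [hp, if_false, Bool.false_eq_true]
      have hg : -1 ≤ PySem.Chars.find.go pvSep t 0 := PySem.Chars.neg_one_le_find t pvSep
      rw [ih (k+1), ih 1]
      split_ifs with h1 h2 <;> push_cast <;> omega

-- the fuel-based splitOn.go computes pvSplit
theorem pvSplitGo_spec (fuel : Nat) : ∀ (l cur : List Char) (acc : List (List Char)),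
    l.length < fuel →
    PySem.Chars.splitOn.go pvSep fuel l cur acc = acc.reverse ++ pvGlue cur.reverse (pvSplit l) := by
  induction fuel with
  | zero => intro l cur acc h; omega
  | succ f ih =>
    intro l cur acc h
    match l with
    | [] =>
      rw [PySem.Chars.splitOn.go.eq_def, pvSplit]
      simp [show PySem.Chars.isIn pvSep [] = false by decide, pvGlue]
    | c :: rest =>
      rw [PySem.Chars.splitOn.go.eq_def]
      simp only [List.length_cons] at h
      by_cases hp : pvSep.isPrefixOf (c :: rest)
      · have h12 : pvSep.length = 12 := by decide
        simp only [hp, if_true]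
        rw [ih _ _ _ (by simp only [List.length_drop, List.length_cons, h12]; omega)]
        have hf0 : PySem.Chars.find (c :: rest) pvSep = 0 := by
          show PySem.Chars.find.go pvSep (c :: rest) 0 = 0
          rw [PySem.Chars.find.go.eq_def]; simp [hp]
        have hin : PySem.Chars.isIn pvSep (c :: rest) = true := by
          simp [PySem.Chars.isIn, hf0]
        conv_rhs => rw [pvSplit]
        rw [if_pos hin, hf0, h12]
        obtain ⟨p, t, hpt⟩ := List.exists_cons_of_ne_nil
          (pvSplit_ne_nil ((c :: rest).drop ((0:Int).toNat + 12)))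
        simp only [Int.toNat_zero, Nat.zero_add] at hpt ⊢
        rw [hpt]
        simp [pvGlue]
      · simp only [hp, if_false, Bool.false_eq_true]
        rw [ih _ _ _ (by omega)]
        have hfind : PySem.Chars.find (c :: rest) pvSep =
            if PySem.Chars.find rest pvSep = -1 then -1 else 1 + PySem.Chars.find rest pvSep := by
          show PySem.Chars.find.go pvSep (c :: rest) 0 = _
          rw [PySem.Chars.find.go.eq_def]
          simp only [hp, if_false, Bool.false_eq_true]
          exact pvFindGo_shift rest 1
        have hg : -1 ≤ PySem.Chars.find rest pvSep := PySem.Chars.neg_one_le_find rest pvSep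
        by_cases hin : PySem.Chars.isIn pvSep rest = true
        · have hgne : PySem.Chars.find rest pvSep ≠ -1 := by
            simpa [PySem.Chars.isIn] using hin
          have hg0 : 0 ≤ PySem.Chars.find rest pvSep := by omega
          have hfc : PySem.Chars.find (c :: rest) pvSep = 1 + PySem.Chars.find rest pvSep := by
            rw [hfind, if_neg hgne]
          have hinc : PySem.Chars.isIn pvSep (c :: rest) = true := by
            simp [PySem.Chars.isIn, hfc]; omega
          rw [pvSplit, if_pos hin]
          conv_rhs => rw [pvSplit]
          rw [if_pos hinc, hfc]
          rw [show (1 + PySem.Chars.find rest pvSep).toNat = (PySem.Chars.find rest pvSep).toNat + 1 by omega]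
          simp only [List.take_succ_cons, List.drop_succ_cons]
          simp [pvGlue]
        · have hgeq : PySem.Chars.find rest pvSep = -1 := by
            simp only [PySem.Chars.isIn, bne_iff_ne, ne_eq, not_not] at hin
            exact hin
          have hfc : PySem.Chars.find (c :: rest) pvSep = -1 := by rw [hfind, if_pos hgeq]
          have hinc : PySem.Chars.isIn pvSep (c :: rest) = false := by
            simp [PySem.Chars.isIn, hfc]
          rw [pvSplit, if_neg (by simp [PySem.Chars.isIn, hgeq])]
          conv_rhs => rw [pvSplit]
          rw [if_neg (by simp [hinc])]
          simp [pvGlue]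

theorem pvSplitOn_eq (l : List Char) : PySem.Chars.splitOn l pvSep = pvSplit l := by
  show PySem.Chars.splitOn.go pvSep (l.length + 1) l [] [] = _
  rw [pvSplitGo_spec (l.length + 1) l [] [] (by omega)]
  obtain ⟨p, t, hpt⟩ := List.exists_cons_of_ne_nil (pvSplit_ne_nil l)
  rw [hpt]
  simp [pvGlue]

theorem pvJoin_pvSplit (l : List Char) : PySem.Chars.join pvSep (pvSplit l) = l := by
  induction l using pvSplit.induct with
  | case1 l hin ih =>
    rw [pvSplit, if_pos hin]
    set f := (PySem.Chars.find l pvSep).toNat with hfdef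
    obtain ⟨p, t, hpt⟩ := List.exists_cons_of_ne_nil (pvSplit_ne_nil (l.drop (f + 12)))
    rw [hpt, PySem.Chars.join_cons_cons, ← hpt, ih]
    have hf0 : 0 ≤ PySem.Chars.find l pvSep := by
      have h1 := PySem.Chars.neg_one_le_find l pvSep
      have h2 : PySem.Chars.find l pvSep ≠ -1 := by simpa [PySem.Chars.isIn] using hin
      omega
    obtain ⟨tl, htl⟩ := (PySem.Chars.find_spec hf0).1
    have hdrop : l.drop (f + 12) = tl := by
      have h12 : pvSep.length = 12 := by decide
      rw [show f + 12 = f + pvSep.length by omega, ← List.drop_drop, ← htl, List.drop_left]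
    rw [hdrop, List.append_assoc, htl, List.take_append_drop]
  | case2 l hin =>
    rw [pvSplit, if_neg hin, PySem.Chars.join_singleton]

-- how many pieces A's loop strips, given rank and the iteration counter
def pvK (rank : String) (i : Int) (len : Nat) : Nat :=
  let n := len - 1
  if rank = "UR" then min (8 - i).toNat n
  else if rank = "LR" then min (2 - i).toNat n
  else n

theorem pvIsIn_toList (response : String) :
    PySem.Str.isIn "leader_skill" response = PySem.Chars.isIn pvSep response.toList := by
  rw [PySem.Str.isIn_eq]; rfl

theorem pvFind_toList (response : String) :
    PySem.Str.find response "leader_skill" = PySem.Chars.find response.toList pvSep := by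
  rw [PySem.Str.find_eq]; rfl

theorem pvFind_nonneg (response : String) (h : PySem.Str.isIn "leader_skill" response = true) :
    0 ≤ PySem.Chars.find response.toList pvSep := by
  rw [pvIsIn_toList] at h
  have h1 := PySem.Chars.neg_one_le_find response.toList pvSep
  have h2 : PySem.Chars.find response.toList pvSep ≠ -1 := by
    simpa [PySem.Chars.isIn] using h
  omega

theorem pvCut_toList (response : String) (h : PySem.Str.isIn "leader_skill" response = true) :
    (PySem.Str.slice response (some (PySem.Str.find response "leader_skill" + 12)) none).toList
      = response.toList.drop ((PySem.Chars.find response.toList pvSep).toNat + 12) := by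
  have hF := pvFind_nonneg response h
  simp only [PySem.Str.toList_slice, PySem.Chars.slice_eq_listSlice]
  rw [pvFind_toList, PySem.List.slice_from _ (by omega)]
  congr 1
  omega

theorem pvSplit_cons_of_isIn (response : String) (h : PySem.Str.isIn "leader_skill" response = true) :
    pvSplit response.toList
      = response.toList.take (PySem.Chars.find response.toList pvSep).toNat
        :: pvSplit (response.toList.drop ((PySem.Chars.find response.toList pvSep).toNat + 12)) := by
  rw [pvIsIn_toList] at h
  rw [pvSplit, if_pos h]

theorem pvSplit_length_pos (l : List Char) : 1 ≤ (pvSplit l).length :=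
  List.length_pos_iff.mpr (pvSplit_ne_nil l)

-- the main loop invariant: A's while loop equals join of the tail of the split
theorem pvLoopA_join (response : String) (rank : String) (i : Int)
    (hUR : rank = "UR" → 0 ≤ i ∧ i < 8) (hLR : rank = "LR" → 0 ≤ i ∧ i < 2) :
    pvLoopA response rank i =
      String.ofList (PySem.Chars.join pvSep
        ((pvSplit response.toList).drop (pvK rank i (pvSplit response.toList).length))) := by
  revert hUR hLR
  induction response, i using pvLoopA.induct rank with
  | case1 response i h i' hbr =>
    intro hUR hLR
    have hi' : i' = i + 1 := rfl
    rw [hi'] at hbr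
    rw [pvLoopA, if_pos h, if_pos hbr]
    rw [pvSplit_cons_of_isIn response h]
    have hlp := pvSplit_length_pos (response.toList.drop ((PySem.Chars.find response.toList pvSep).toNat + 12))
    have hi7 : i = 7 := by omega
    rw [show pvK rank i (_ :: pvSplit (response.toList.drop ((PySem.Chars.find response.toList pvSep).toNat + 12))).length = 1 by
      simp [pvK, hbr.1, hi7]; omega]
    rw [List.drop_one, List.tail_cons, pvJoin_pvSplit, ← pvCut_toList response h, String.ofList_toList]
  | case2 response i h i' hnbr hbr =>
    intro hUR hLR
    have hi' : i' = i + 1 := rfl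
    rw [hi'] at hbr hnbr
    rw [pvLoopA, if_pos h, if_neg hnbr, if_pos hbr]
    rw [pvSplit_cons_of_isIn response h]
    have hlp := pvSplit_length_pos (response.toList.drop ((PySem.Chars.find response.toList pvSep).toNat + 12))
    have hi1 : i = 1 := by omega
    have hnUR : rank ≠ "UR" := by
      intro hc; rw [hc] at hbr; exact absurd hbr.1 (by decide)
    rw [show pvK rank i (_ :: pvSplit (response.toList.drop ((PySem.Chars.find response.toList pvSep).toNat + 12))).length = 1 by
      simp [pvK, hbr.1, hi1]; omega]
    rw [List.drop_one, List.tail_cons, pvJoin_pvSplit, ← pvCut_toList response h, String.ofList_toList]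
  | case3 response i h response' i' hn1 hn2 ih =>
    intro hUR hLR
    have hi' : i' = i + 1 := rfl
    have hr' : response' = PySem.Str.slice response (some (PySem.Str.find response "leader_skill" + 12)) none := rfl
    rw [hi'] at hn1 hn2
    rw [hi', hr'] at ih
    rw [pvLoopA, if_pos h, if_neg hn1, if_neg hn2]
    have hUR' : rank = "UR" → 0 ≤ i + 1 ∧ i + 1 < 8 := by
      intro hrk
      have h1 := hUR hrk
      have h2 : ¬ (i + 1 = 8) := fun hc => hn1 ⟨hrk, hc⟩
      omega
    have hLR' : rank = "LR" → 0 ≤ i + 1 ∧ i + 1 < 2 := by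
      intro hrk
      have h1 := hLR hrk
      have h2 : ¬ (i + 1 = 2) := fun hc => hn2 ⟨hrk, hc⟩
      omega
    rw [ih hUR' hLR']
    congr 2
    rw [pvCut_toList response h, pvSplit_cons_of_isIn response h]
    have hlp := pvSplit_length_pos (response.toList.drop ((PySem.Chars.find response.toList pvSep).toNat + 12))
    have hk : ∀ p, pvK rank i (p :: pvSplit (response.toList.drop ((PySem.Chars.find response.toList pvSep).toNat + 12))).length
        = pvK rank (i + 1) (pvSplit (response.toList.drop ((PySem.Chars.find response.toList pvSep).toNat + 12))).length + 1 := by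
      intro p
      simp only [pvK, List.length_cons]
      by_cases h1 : rank = "UR"
      · have := hUR h1; simp [h1]; omega
      · by_cases h2 : rank = "LR"
        · have := hLR h2; simp [h2]; omega
        · simp [h1, h2]; omega
    rw [hk, List.drop_succ_cons]
  | case4 response i h =>
    intro hUR hLR
    rw [pvLoopA, if_neg h]
    have hnot : PySem.Chars.isIn pvSep response.toList = false := by
      rw [pvIsIn_toList] at h; simpa using h
    rw [pvSplit, if_neg (by simp [hnot])]
    rw [show pvK rank i [response.toList].length = 0 by
      simp only [pvK, List.length_cons, List.length_nil]; split_ifs <;> omega]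
    rw [List.drop_zero, PySem.Chars.join_singleton, String.ofList_toList]

-- ===== VERDICT (by name: the statement is the Claim_ definition above) =====
theorem pvParts_eq (response : String) :
    (PySem.Str.split? response "leader_skill").getD []
      = (pvSplit response.toList).map String.ofList := by
  simp only [PySem.Str.split?]
  rw [show ("leader_skill" : String).toList = pvSep from rfl]
  simp only [PySem.Chars.split?, show pvSep.isEmpty = false from by decide,
    Bool.false_eq_true, if_false, Option.map_some, Option.getD_some]
  rw [pvSplitOn_eq]

theorem pvLoop_eq_join (response rank : String) :
    pvLoopA response rank 0
      = PySem.Str.join "leader_skill"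
          (PySem.List.slice ((PySem.Str.split? response "leader_skill").getD [])
            (some (if rank = "UR" then
                min 8 ((((PySem.Str.split? response "leader_skill").getD []).length : Int) - 1)
              else if rank = "LR" then
                min 2 ((((PySem.Str.split? response "leader_skill").getD []).length : Int) - 1)
              else (((PySem.Str.split? response "leader_skill").getD []).length : Int) - 1))
            none) := by
  rw [pvLoopA_join response rank 0 (fun _ => by omega) (fun _ => by omega)]
  rw [pvParts_eq]
  have hL := pvSplit_length_pos response.toList
  set X := pvSplit response.toList with hX
  set kI : Int := if rank = "UR" then min 8 ((X.map String.ofList).length - 1 : Int)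
    else if rank = "LR" then min 2 ((X.map String.ofList).length - 1 : Int)
    else ((X.map String.ofList).length - 1 : Int) with hkI
  have hk0 : 0 ≤ kI := by
    simp only [hkI, List.length_map]; split_ifs <;> omega
  rw [PySem.List.slice_from _ hk0]
  have hkK : kI.toNat = pvK rank 0 X.length := by
    simp only [hkI, pvK, List.length_map]; split_ifs <;> omega
  rw [PySem.Str.join, show ("leader_skill" : String).toList = pvSep from rfl]
  rw [← List.map_drop, List.map_map]
  simp only [Function.comp_def, String.toList_ofList, List.map_id']
  rw [hkK]

theorem retrieveLead_spec : Claim_equal_retrieveLead := by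
  unfold Claim_equal_retrieveLead Spec_retrieveLead
  intro response rank EZA _
  simp only [retrieveLead, retrieveLead_alt, List.foldl]
  by_cases hE : EZA = 1 ∨ EZA = 2
  · rw [if_pos hE, if_pos hE, pvLoop_eq_join response rank]
  · rw [if_neg hE, if_neg hE]
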